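-- pv_equiv track=rewrite | github.com/muregii/codeKenya | codeK(main)/Leetcode/solution/2200-2299/2285. Maximum Total Importance of Roads/solution.py | maximumImportance
-- ===== SOURCE A (Python) =====
-- def maximumImportance(n, roads):
--     """
--     :type n: int
--     :type roads: List[List[int]]
--     :rtype: int
--     """
--     from collections import defaultdict
--
--     # Step 1: Calculate the degree of each city
--     degree = defaultdict(int)
--     for road in roads:
--         degree[road[0]] += 1
--         degree[road[1]] += 1
--
--     # Step 2: Sort cities based on degree
--     sorted_cities = sorted(degree.keys(), key=lambda x: degree[x], reverse=True)
--
--     # Step 3: Assign values from n to 1 based on sorted order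
--     city_value = {}
--     value = n
--     for city in sorted_cities:
--         city_value[city] = value
--         value -= 1
--
--     # Step 4: Calculate the total importance
--     total_importance = 0
--     for road in roads:
--         total_importance += city_value[road[0]] + city_value[road[1]]
--
--     return total_importance
-- ===== SOURCE B (Python) =====
-- def maximumImportance(n, roads):
--     # Count endpoint degrees, then sort the degree multiset itself (plain ints,
--     # descending) and pair it with the values n, n-1, ... in one fold: the city
--     # labels, the city->value dict and the second pass over roads all disappear.
--     deg = {}
--     for road in roads:
--         deg[road[0]] = deg.get(road[0], 0) + 1
--         deg[road[1]] = deg.get(road[1], 0) + 1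
--     total = 0
--     value = n
--     for d in sorted(deg.values(), reverse=True):
--         total += d * value
--         value -= 1
--     return total
-- ===== Notes on version B (the rewrite author's own statement) =====
-- stated objective: simpler
-- what changed: Instead of sorting the city labels by degree, building a city->value dict and re-walking all roads summing two lookups per road, B sorts the bag of degree values itself (plain descending int sort) and folds it once against the values n, n-1, ..., using the identity that the road-sum equals the degree-weighted value sum.
import Mathlib
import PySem

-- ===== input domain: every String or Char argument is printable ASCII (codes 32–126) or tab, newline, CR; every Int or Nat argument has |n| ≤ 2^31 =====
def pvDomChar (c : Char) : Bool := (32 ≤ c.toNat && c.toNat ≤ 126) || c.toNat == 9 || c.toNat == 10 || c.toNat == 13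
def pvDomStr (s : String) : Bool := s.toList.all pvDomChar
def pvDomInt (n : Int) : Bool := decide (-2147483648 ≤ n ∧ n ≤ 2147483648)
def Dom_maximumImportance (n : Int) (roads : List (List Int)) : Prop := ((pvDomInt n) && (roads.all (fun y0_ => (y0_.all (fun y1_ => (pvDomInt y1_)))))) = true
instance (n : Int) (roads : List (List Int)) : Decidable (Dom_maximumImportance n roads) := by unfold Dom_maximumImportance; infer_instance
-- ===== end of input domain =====

-- B replaces A's keyed sort of city labels + city→value dict + second pass over the
-- roads by a plain descending sort of the degree multiset folded once against n, n-1, …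

-- ===== PORT A =====
def maximumImportance (n : Int) (roads : List (List Int)) : Int :=
  let degree : PySem.Dict Int Int :=
    roads.foldl (fun d road =>
        (d.modify (PySem.List.pyGetD road 0 0) 0 (· + 1)).modify
          (PySem.List.pyGetD road 1 0) 0 (· + 1))
      PySem.Dict.empty
  let sortedCities := PySem.List.sorted degree.keys (fun x => degree.getD x 0) true
  let cityValue :=
    (sortedCities.foldl (fun (p : PySem.Dict Int Int × Int) city =>
        (p.1.insert city p.2, p.2 - 1)) (PySem.Dict.empty, n)).1
  roads.foldl (fun t road =>
      t + cityValue.getD (PySem.List.pyGetD road 0 0) 0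
        + cityValue.getD (PySem.List.pyGetD road 1 0) 0) 0

-- ===== PORT B =====
def maximumImportance_alt (n : Int) (roads : List (List Int)) : Int :=
  let deg : PySem.Dict Int Int :=
    roads.foldl (fun d road =>
        let d1 := d.insert (PySem.List.pyGetD road 0 0)
                    (d.getD (PySem.List.pyGetD road 0 0) 0 + 1)
        d1.insert (PySem.List.pyGetD road 1 0)
                    (d1.getD (PySem.List.pyGetD road 1 0) 0 + 1))
      PySem.Dict.empty
  ((PySem.List.sorted deg.values (fun x => x) true).foldl
      (fun (p : Int × Int) d => (p.1 + d * p.2, p.2 - 1)) (0, n)).1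

-- ===== PRECONDITION & SPEC =====
-- Pre_ excludes exactly the inputs where Python A raises: a road list with fewer
-- than two entries makes road[0]/road[1] an IndexError.
def Pre_maximumImportance (n : Int) (roads : List (List Int)) : Prop :=
  ∀ r ∈ roads, 2 ≤ r.length
instance (n : Int) (roads : List (List Int)) : Decidable (Pre_maximumImportance n roads) := by
  unfold Pre_maximumImportance; infer_instance

def pvWitness_maximumImportance : Int × List (List Int) := (5, [[0, 1], [1, 2], [1, 3]])

def Spec_maximumImportance (n : Int) (roads : List (List Int)) (out : Int) : Prop :=
  out = maximumImportance_alt n roads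
instance (n : Int) (roads : List (List Int)) (out : Int) : Decidable (Spec_maximumImportance n roads out) := by
  unfold Spec_maximumImportance; infer_instance

-- ===== CLAIM (what is proved, stated in full; the proofs are below) =====
def Claim_equal_maximumImportance : Prop :=
  ∀ (n : Int) (roads : List (List Int)), Dom_maximumImportance n roads →
    Pre_maximumImportance n roads →
      Spec_maximumImportance n roads (maximumImportance n roads)

-- ===== LEMMAS AND PROOFS =====

-- the stream of road endpoints, in A's (and B's) visiting order
def pvEnds (roads : List (List Int)) : List Int :=
  roads.flatMap (fun r => [PySem.List.pyGetD r 0 0, PySem.List.pyGetD r 1 0])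

-- Σ_i l[i] * (v - i)
def pvWsum : Int → List Int → Int
  | _, [] => 0
  | v, d :: t => d * v + pvWsum (v - 1) t

-- a fold doing two steps per road is the fold over the endpoint stream
theorem pv_foldl_two {α : Type} (g : α → Int → α) :
    ∀ (roads : List (List Int)) (a : α),
      roads.foldl (fun d r => g (g d (PySem.List.pyGetD r 0 0)) (PySem.List.pyGetD r 1 0)) a
        = (pvEnds roads).foldl g a := by
  intro roads
  induction roads with
  | nil => intro a; simp [pvEnds]
  | cons r rs ih =>
      intro a
      simp only [pvEnds, List.flatMap_cons, List.foldl_append, List.foldl_cons,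
        List.foldl_nil] at *
      exact ih _

-- B's summation fold
theorem pv_foldl_wsum (l : List Int) :
    ∀ (t v : Int),
      (l.foldl (fun (p : Int × Int) d => (p.1 + d * p.2, p.2 - 1)) (t, v)).1
        = t + pvWsum v l := by
  induction l with
  | nil => intro t v; simp [pvWsum]
  | cons d tl ih =>
      intro t v
      simp only [List.foldl_cons, pvWsum]
      rw [ih]; ring

-- keys not in the remaining list are untouched by A's value-assignment fold
theorem pv_cv_untouched (t : List Int) (c : Int) (hc : c ∉ t) :
    ∀ (d : PySem.Dict Int Int) (v : Int),
      ((t.foldl (fun (p : PySem.Dict Int Int × Int) city =>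
          (p.1.insert city p.2, p.2 - 1)) (d, v)).1).getD c 0 = d.getD c 0 := by
  induction t with
  | nil => intro d v; rfl
  | cons x tl ih =>
      intro d v
      simp only [List.foldl_cons]
      simp only [List.mem_cons, not_or] at hc
      rw [ih hc.2]
      exact PySem.Dict.getD_insert_of_ne _ _ _ hc.1

-- the degree-weighted sum of A's assigned values is the positional weighted sum
theorem pv_sum_cv (w : Int → Int) :
    ∀ (S : List Int), S.Nodup → ∀ (d : PySem.Dict Int Int) (v : Int),
      (S.map (fun c => w c *
          ((S.foldl (fun (p : PySem.Dict Int Int × Int) city =>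
              (p.1.insert city p.2, p.2 - 1)) (d, v)).1).getD c 0)).sum
        = pvWsum v (S.map w) := by
  intro S
  induction S with
  | nil => intro _ d v; simp [pvWsum]
  | cons c t ih =>
      intro hnd d v
      have hct : c ∉ t := (List.nodup_cons.mp hnd).1
      have hndt : t.Nodup := (List.nodup_cons.mp hnd).2
      simp only [List.foldl_cons, List.map_cons, List.sum_cons, pvWsum]
      congr 1
      · rw [pv_cv_untouched t c hct, PySem.Dict.getD_insert_self]
      · -- the tail terms only look up keys of t, handled by the IH at (d.insert c v, v-1)
        exact ih hndt (d.insert c v) (v - 1)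

-- two descending-sorted permutations of the same multiset are equal
theorem pv_sorted_desc_unique (L R : List Int) (hperm : L.Perm R)
    (hL : L.Pairwise (fun a b => b ≤ a)) (hR : R.Pairwise (fun a b => b ≤ a)) :
    L = R := by
  have hrp : L.reverse.Perm R.reverse :=
    (List.reverse_perm L).trans (hperm.trans (List.reverse_perm R).symm)
  have h := PySem.List.eq_of_perm_of_pairwise_le_of_injective (fun x : Int => x)
    (fun _ _ h => h) hrp
    (by rw [List.pairwise_reverse]; exact hL)
    (by rw [List.pairwise_reverse]; exact hR)
  exact List.reverse_injective h

-- grouping a sum over a stream by distinct elements with multiplicities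
theorem pv_regroup (es : List Int) (f : Int → Int) :
    (es.map f).sum
      = ((PySem.Set.ofList es).map (fun c => (es.count c : Int) * f c)).sum := by
  rw [Finset.sum_list_map_count]
  rw [← List.sum_toFinset (fun c => (es.count c : Int) * f c) (PySem.Set.nodup_ofList es)]
  have hfs : (PySem.Set.ofList es).toFinset = es.toFinset := by
    apply Finset.ext; intro a
    simp [List.mem_toFinset, PySem.Set.mem_ofList]
  rw [hfs]
  apply Finset.sum_congr rfl
  intro m _
  push_cast [nsmul_eq_mul]
  ring

-- ===== VERDICT (by name: the statement is the Claim_ definition above) =====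
theorem maximumImportance_spec : Claim_equal_maximumImportance := by
  intro n roads _hdom _hpre
  unfold Spec_maximumImportance maximumImportance maximumImportance_alt
  simp only []
  -- both degree dicts are the counter of the endpoint stream
  have hA : roads.foldl (fun d road =>
      (PySem.Dict.modify d (PySem.List.pyGetD road 0 0) 0 (· + 1)).modify
        (PySem.List.pyGetD road 1 0) 0 (· + 1)) PySem.Dict.empty
      = PySem.Dict.counter (pvEnds roads) :=
    pv_foldl_two (fun d x => PySem.Dict.modify d x 0 (· + 1)) roads PySem.Dict.empty
  have hB : roads.foldl (fun d road =>
      let d1 := PySem.Dict.insert d (PySem.List.pyGetD road 0 0)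
                  (d.getD (PySem.List.pyGetD road 0 0) 0 + 1)
      d1.insert (PySem.List.pyGetD road 1 0)
                  (d1.getD (PySem.List.pyGetD road 1 0) 0 + 1)) PySem.Dict.empty
      = PySem.Dict.counter (pvEnds roads) :=
    (pv_foldl_two (fun d x => PySem.Dict.insert d x (d.getD x 0 + 1)) roads
      PySem.Dict.empty).trans (PySem.Dict.foldl_insert_getD_add_one_eq_counter _)
  rw [hA, hB]
  set es := pvEnds roads with hes
  set D := PySem.Dict.counter es with hD
  set S := PySem.List.sorted D.keys (fun x => D.getD x 0) true with hS
  have hSperm : S.Perm D.keys := PySem.List.sorted_perm _ _ _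
  have hSnodup : S.Nodup := hSperm.nodup_iff.mpr (by rw [hD]; exact PySem.Dict.nodup_keys_counter es)
  have hw : ∀ c : Int, D.getD c 0 = (es.count c : Int) := by
    intro c; rw [hD]; exact PySem.Dict.getD_counter es c
  -- B's side: fold is a positional weighted sum
  rw [pv_foldl_wsum, zero_add]
  -- A's side: road fold → endpoint-stream sum → regroup by city → positional sum
  rw [pv_foldl_two (fun t x => t +
      (PySem.Dict.getD (S.foldl (fun (p : PySem.Dict Int Int × Int) city =>
        (p.1.insert city p.2, p.2 - 1)) (PySem.Dict.empty, n)).1 x 0)) roads 0]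
  rw [PySem.List.foldl_add, zero_add, ← hes]
  rw [pv_regroup es]
  have hkeys : PySem.Set.ofList es = D.keys := by rw [hD, PySem.Dict.keys_counter]
  rw [hkeys]
  have hmapsum : (D.keys.map (fun c => (es.count c : Int) *
      (PySem.Dict.getD (S.foldl (fun (p : PySem.Dict Int Int × Int) city =>
        (p.1.insert city p.2, p.2 - 1)) (PySem.Dict.empty, n)).1 c 0))).sum
      = (S.map (fun c => (es.count c : Int) *
      (PySem.Dict.getD (S.foldl (fun (p : PySem.Dict Int Int × Int) city =>
        (p.1.insert city p.2, p.2 - 1)) (PySem.Dict.empty, n)).1 c 0))).sum :=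
    (List.Perm.sum_eq (hSperm.map _)).symm
  rw [hmapsum]
  rw [pv_sum_cv (fun c => (es.count c : Int)) S hSnodup PySem.Dict.empty n]
  -- it remains to identify the two descending degree lists
  congr 1
  apply pv_sorted_desc_unique
  · -- permutation: both are rearrangements of D's values
    have hv : D.values = D.keys.map (fun c => (es.count c : Int)) := by
      rw [PySem.Dict.values_eq_map_keys D (by rw [hD]; exact PySem.Dict.nodup_keys_counter es) 0]
      exact List.map_congr_left (fun k _ => hw k)
    have h2 : (D.keys.map (fun c => (es.count c : Int))).Perm
        (S.map (fun c => (es.count c : Int))) := (hSperm.map _).symm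
    exact ((PySem.List.sorted_perm D.values (fun x => x) true).trans
      (by rw [hv]; exact h2)).symm
  · -- S.map count is descending since S is sorted by degree descending
    rw [List.pairwise_map]
    have h1 := PySem.List.sorted_pairwise_rev D.keys (fun x => D.getD x 0)
    rw [← hS] at h1
    exact h1.imp (fun {a b} hab => by rw [← hw a, ← hw b]; exact hab)
  · -- descending: sorted with reverse=True
    exact PySem.List.sorted_pairwise_rev D.values (fun x => x)
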